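-- pv_equiv track=rewrite | github.com/radoAngelov/Python-Training | week01/diveinpython.py | birthday_ranges
-- ===== SOURCE A (Python) =====
-- def birthday_ranges(birthdays, ranges):
--     result = []
--     for i in ranges:
--         counter = 0
--         for x in birthdays:
--             if x >= i[0] and x <= i[1]:
--                 counter += 1
--         result.append(counter)
--     return result
-- ===== SOURCE B (Python) =====
-- def birthday_ranges(birthdays, ranges):
--     s = sorted(birthdays)
--     n = len(s)
--
--     def search(pred):
--         # first index whose element does NOT satisfy pred (binary search)
--         lo, hi = 0, n
--         while lo < hi:
--             mid = (lo + hi) // 2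
--             if pred(s[mid]):
--                 lo = mid + 1
--             else:
--                 hi = mid
--         return lo
--
--     out = []
--     for a, b in ranges:
--         hi_idx = search(lambda x: x <= b)   # bisect_right(s, b)
--         lo_idx = search(lambda x: x < a)    # bisect_left(s, a)
--         out.append(max(0, hi_idx - lo_idx))
--     return out
-- ===== Notes on version B (the rewrite author's own statement) =====
-- stated objective: faster
-- what changed: B sorts the birthdays once and answers each range with two hand-written binary searches (bisect_right(high) - bisect_left(low), clamped at 0) instead of A's full scan of the birthday list per range.
import Mathlib
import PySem

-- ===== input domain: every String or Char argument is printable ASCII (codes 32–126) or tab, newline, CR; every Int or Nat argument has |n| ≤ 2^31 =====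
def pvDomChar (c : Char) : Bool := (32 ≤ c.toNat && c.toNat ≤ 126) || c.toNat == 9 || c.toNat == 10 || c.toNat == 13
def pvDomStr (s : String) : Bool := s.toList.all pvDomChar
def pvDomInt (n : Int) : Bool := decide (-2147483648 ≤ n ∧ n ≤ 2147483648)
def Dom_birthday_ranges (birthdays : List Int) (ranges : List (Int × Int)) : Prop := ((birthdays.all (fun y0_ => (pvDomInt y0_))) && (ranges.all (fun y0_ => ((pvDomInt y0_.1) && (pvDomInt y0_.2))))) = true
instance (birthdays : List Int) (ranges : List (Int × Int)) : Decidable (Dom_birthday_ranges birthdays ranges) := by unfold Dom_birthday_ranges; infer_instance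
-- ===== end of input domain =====

-- B replaces A's per-range full scan of the birthday list by one sort plus two
-- binary searches per range (objective: faster; the asymptotic change O(R*N) → O((N+R) log N)).

-- ===== PORT A =====
def birthday_ranges (birthdays : List Int) (ranges : List (Int × Int)) : List Int :=
  ranges.foldl (fun result i =>
    result ++ [birthdays.foldl (fun counter x =>
      if x ≥ i.1 ∧ x ≤ i.2 then counter + 1 else counter) (0 : Int)]) []

-- ===== PORT B =====
-- Source B's hand-written binary search: first index in [lo, hi) whose element fails pred
def pvSearch (s : List Int) (pred : Int → Bool) (lo hi : Nat) : Nat :=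
  if lo < hi then
    let mid := (lo + hi) / 2
    if pred (s.getD mid 0) then pvSearch s pred (mid + 1) hi
    else pvSearch s pred lo mid
  else lo
termination_by hi - lo
decreasing_by all_goals omega

def birthday_ranges_alt (birthdays : List Int) (ranges : List (Int × Int)) : List Int :=
  let s := PySem.List.sorted birthdays (fun x => x) false
  let n := s.length
  ranges.foldl (fun out r =>
    let hi_idx := pvSearch s (fun x => x ≤ r.2) 0 n
    let lo_idx := pvSearch s (fun x => x < r.1) 0 n
    out ++ [max 0 ((hi_idx : Int) - (lo_idx : Int))]) []

-- ===== PRECONDITION & SPEC =====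
def Spec_birthday_ranges (birthdays : List Int) (ranges : List (Int × Int)) (out : List Int) : Prop := out = birthday_ranges_alt birthdays ranges
instance (birthdays : List Int) (ranges : List (Int × Int)) (out : List Int) : Decidable (Spec_birthday_ranges birthdays ranges out) := by unfold Spec_birthday_ranges; infer_instance

-- ===== CLAIM (what is proved, stated in full; the proofs are below) =====
def Claim_equal_birthday_ranges : Prop := ∀ (birthdays : List Int) (ranges : List (Int × Int)), Dom_birthday_ranges birthdays ranges → Spec_birthday_ranges birthdays ranges (birthday_ranges birthdays ranges)

-- ===== LEMMAS AND PROOFS =====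

-- a list whose elements satisfy p exactly on the indices below k has countP p = k
theorem pv_countP_of_prefix (p : Int → Bool) :
    ∀ (s : List Int) (k : Nat), k ≤ s.length →
    (∀ i (h : i < s.length), i < k → p s[i] = true) →
    (∀ i (h : i < s.length), k ≤ i → p s[i] = false) →
    s.countP p = k := by
  intro s
  induction s with
  | nil => intro k hk _ _; simp at hk ⊢; omega
  | cons x t ih =>
    intro k hk htrue hfalse
    cases k with
    | zero =>
      have hx : p x = false := hfalse 0 (by simp) (Nat.zero_le _)
      have : t.countP p = 0 := by
        apply ih 0 (Nat.zero_le _) (by intro i h hi; omega)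
        intro i h _
        exact hfalse (i+1) (by simpa using Nat.succ_lt_succ h) (Nat.zero_le _)
      simp [hx, this]
    | succ k' =>
      have hx : p x = true := htrue 0 (by simp) (Nat.succ_pos _)
      have ht : t.countP p = k' := by
        apply ih k' (by simpa using hk)
        · intro i h hi
          exact htrue (i+1) (by simpa using Nat.succ_lt_succ h) (by omega)
        · intro i h hi
          exact hfalse (i+1) (by simpa using Nat.succ_lt_succ h) (by omega)
      simp [hx, ht]

-- the binary search on a sorted list computes countP, for a downward-closed predicate
theorem pv_search_eq_countP (s : List Int) (pred : Int → Bool)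
    (hsort : List.Pairwise (fun a b => a ≤ b) s)
    (hmono : ∀ x y : Int, x ≤ y → pred y = true → pred x = true) :
    ∀ (fuel lo hi : Nat), hi - lo ≤ fuel → lo ≤ hi → hi ≤ s.length →
    (∀ i (h : i < s.length), i < lo → pred s[i] = true) →
    (∀ i (h : i < s.length), hi ≤ i → pred s[i] = false) →
    pvSearch s pred lo hi = s.countP pred := by
  have hget : ∀ i j (hi : i < s.length) (hj : j < s.length), i ≤ j → s[i] ≤ s[j] := by
    intro i j hi hj hij
    rcases Nat.lt_or_ge i j with h | h
    · exact (List.pairwise_iff_getElem.mp hsort) i j hi hj h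
    · have : i = j := by omega
      subst this; exact le_refl _
  intro fuel
  induction fuel with
  | zero =>
    intro lo hi hfuel hle hhi htrue hfalse
    have : lo = hi := by omega
    subst this
    rw [pvSearch]
    simp only [lt_irrefl, if_false]
    exact (pv_countP_of_prefix pred s lo (by omega) htrue
      (fun i h hi => hfalse i h hi)).symm
  | succ f ih =>
    intro lo hi hfuel hle hhi htrue hfalse
    rw [pvSearch]
    by_cases hlt : lo < hi
    · simp only [hlt, if_true]
      have hmidlt : (lo + hi) / 2 < hi := by omega
      have hmidge : lo ≤ (lo + hi) / 2 := by omega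
      have hmids : (lo + hi) / 2 < s.length := by omega
      have hgetd : s.getD ((lo + hi) / 2) 0 = s[(lo + hi) / 2] := List.getD_eq_getElem s 0 hmids
      by_cases hp : pred (s.getD ((lo + hi) / 2) 0) = true
      · simp only [hp, if_true]
        apply ih ((lo + hi) / 2 + 1) hi (by omega) (by omega) hhi
        · intro i h hi'
          exact hmono s[i] s[(lo + hi) / 2] (hget i _ h hmids (by omega)) (hgetd ▸ hp)
        · exact hfalse
      · simp only [hp]
        apply ih lo ((lo + hi) / 2) (by omega) (by omega) (by omega) htrue
        intro i h hi'
        have hpm : ¬ pred s[(lo + hi) / 2] = true := by rw [← hgetd]; exact hp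
        by_cases hc : pred s[i] = true
        · exact absurd (hmono s[(lo + hi) / 2] s[i] (hget _ i hmids h hi') hc) hpm
        · exact Bool.eq_false_iff.mpr hc
    · simp only [hlt, if_false]
      have : lo = hi := by omega
      subst this
      exact (pv_countP_of_prefix pred s lo (by omega) htrue
        (fun i h hi => hfalse i h hi)).symm

-- A's inner loop counts the elements in the range
theorem pv_inner_count (a b : Int) :
    ∀ (s : List Int) (c : Int),
    s.foldl (fun counter x => if x ≥ a ∧ x ≤ b then counter + 1 else counter) c
      = c + (s.countP (fun x => decide (a ≤ x ∧ x ≤ b)) : Int) := by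
  intro s
  induction s with
  | nil => intro c; simp
  | cons x t ih =>
    intro c
    by_cases h : a ≤ x ∧ x ≤ b
    · simp [ih, h, ge_iff_le]
      ring
    · simp [ih, h, ge_iff_le]

-- counting arithmetic: count(≤ b) − count(< a), clamped at 0, is the in-range count
theorem pv_count_split_le (a b : Int) (hab : a ≤ b) (s : List Int) :
    s.countP (fun x => decide (x ≤ b))
      = s.countP (fun x => decide (x < a)) + s.countP (fun x => decide (a ≤ x ∧ x ≤ b)) := by
  induction s with
  | nil => simp
  | cons x t ih =>
    simp only [List.countP_cons, ih, decide_eq_true_eq]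
    split_ifs <;> omega

theorem pv_count_split (a b : Int) (s : List Int) :
    max 0 ((s.countP (fun x => decide (x ≤ b)) : Int) - (s.countP (fun x => decide (x < a)) : Int))
      = (s.countP (fun x => decide (a ≤ x ∧ x ≤ b)) : Int) := by
  by_cases hab : a ≤ b
  · have h := pv_count_split_le a b hab s
    omega
  · have h0 : s.countP (fun x => decide (a ≤ x ∧ x ≤ b)) = 0 :=
      List.countP_eq_zero.mpr (by intro x _; simp; omega)
    have hle : s.countP (fun x => decide (x ≤ b)) ≤ s.countP (fun x => decide (x < a)) :=
      List.countP_mono_left (by intro x _ h; simp at h ⊢; omega)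
    omega

theorem pv_foldl_append {α : Type} (f : α → Int) :
    ∀ (l : List α) (acc : List Int),
    l.foldl (fun r i => r ++ [f i]) acc = acc ++ l.map f := by
  intro l
  induction l with
  | nil => simp
  | cons x t ih => intro acc; simp [ih]

-- ===== VERDICT (by name: the statement is the Claim_ definition above) =====
theorem birthday_ranges_spec : Claim_equal_birthday_ranges := by
  intro birthdays ranges _
  unfold Spec_birthday_ranges birthday_ranges birthday_ranges_alt
  rw [pv_foldl_append, pv_foldl_append]
  simp only [List.nil_append]
  apply List.map_congr_left
  intro r _
  set s := PySem.List.sorted birthdays (fun x => x) false with hs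
  have hsort : List.Pairwise (fun a b : Int => a ≤ b) s := by
    simpa using PySem.List.sorted_pairwise birthdays (fun x => x)
  have hperm : s.Perm birthdays := PySem.List.sorted_perm birthdays (fun x => x) false
  have hR : pvSearch s (fun x => decide (x ≤ r.2)) 0 s.length
      = s.countP (fun x => decide (x ≤ r.2)) :=
    pv_search_eq_countP s _ hsort
      (fun x y hxy hy => by simp at hy ⊢; omega)
      s.length 0 s.length (by omega) (Nat.zero_le _) (le_refl _)
      (fun i h hi => absurd hi (by omega))
      (fun i h hi => absurd h (by omega))
  have hL : pvSearch s (fun x => decide (x < r.1)) 0 s.length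
      = s.countP (fun x => decide (x < r.1)) :=
    pv_search_eq_countP s _ hsort
      (fun x y hxy hy => by simp at hy ⊢; omega)
      s.length 0 s.length (by omega) (Nat.zero_le _) (le_refl _)
      (fun i h hi => absurd hi (by omega))
      (fun i h hi => absurd h (by omega))
  rw [pv_inner_count]
  simp only [hR, hL, pv_count_split r.1 r.2 s]
  rw [hperm.countP_eq]
  simp
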